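-- pv_equiv track=rewrite | github.com/kenbockler/Andmeteaduse_masin-ppe_projekt | PROJEKT/K05/S189/2021-09-29-14-08-41/kodu3.py | moos
-- ===== SOURCE A (Python) =====
-- def moos(suur, väike, kilod):
--     suur_kasutatud_karpe = 0
--     väike_kasutatud_karpe = 0
--     while int(kilod) > 0:
--         if kilod >=5 and int(suur) > 0:
--             kilod_uus = kilod - 5
--             suur_uus = suur - 1
--             suur = suur_uus
--             suur_kasutatud_karpe += 1
--             kilod = kilod_uus
--             if kilod_uus == 0:
--                 break
--             continue
--         else:
--             if int(väike) > 0: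
--                 kilod_uus = kilod - 1
--                 väike_uus = väike - 1
--                 väike = väike_uus
--                 väike_kasutatud_karpe += 1
--                 kilod = kilod_uus
--                 if kilod_uus == 0:
--                     break
--             else:
--                 break
--     if kilod == 0:
--         return (suur_kasutatud_karpe + väike_kasutatud_karpe)
--     else:
--         return (-1)
-- ===== SOURCE B (Python) =====
-- def moos(suur, väike, kilod):
--     if kilod <= 0:
--         return 0 if kilod == 0 else -1
--     big = min(suur, kilod // 5) if suur > 0 else 0
--     rem = kilod - 5 * big
--     if rem == 0:
--         return big
--     return big + rem if väike >= rem else -1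
-- ===== Notes on version B (the rewrite author's own statement) =====
-- stated objective: faster
-- what changed: Replaced the per-box while loop (one iteration per 5kg/1kg box used) with closed-form arithmetic: big = min(suur, kilod//5), remainder covered by small boxes if enough, else -1.
import Mathlib
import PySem

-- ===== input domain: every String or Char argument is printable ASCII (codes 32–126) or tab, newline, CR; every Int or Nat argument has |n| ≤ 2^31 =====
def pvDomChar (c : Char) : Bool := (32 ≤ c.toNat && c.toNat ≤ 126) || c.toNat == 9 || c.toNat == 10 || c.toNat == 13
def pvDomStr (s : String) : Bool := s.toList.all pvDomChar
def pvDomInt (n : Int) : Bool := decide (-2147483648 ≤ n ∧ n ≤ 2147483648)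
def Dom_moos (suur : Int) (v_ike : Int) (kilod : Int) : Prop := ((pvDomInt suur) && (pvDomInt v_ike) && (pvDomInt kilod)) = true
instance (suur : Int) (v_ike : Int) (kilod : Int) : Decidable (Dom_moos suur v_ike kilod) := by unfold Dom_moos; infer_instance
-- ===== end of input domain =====

-- B replaces A's one-iteration-per-box greedy while loop by closed-form arithmetic (objective: faster).

-- ===== PORT A =====
-- A's while loop, transliterated; fuel = kilod.toNat suffices since kilod strictly
-- decreases each iteration and the loop only runs while kilod > 0.
def moosGo (fuel : Nat) (suur : Int) (v_ike : Int) (kilod : Int) (sk : Int) (vk : Int) : Int :=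
  if kilod > 0 then
    match fuel with
    | 0 => -1  -- unreachable for fuel ≥ kilod.toNat
    | f + 1 =>
      if kilod ≥ 5 ∧ suur > 0 then
        -- 'if kilod_uus == 0 then break' / 'continue': both re-reach the loop test, identical here
        moosGo f (suur - 1) v_ike (kilod - 5) (sk + 1) vk
      else if v_ike > 0 then
        moosGo f suur (v_ike - 1) (kilod - 1) sk (vk + 1)
      else
        -- break with kilod > 0, then the final check
        if kilod = 0 then sk + vk else -1
  else
    if kilod = 0 then sk + vk else -1

def moos (suur : Int) (v_ike : Int) (kilod : Int) : Int :=
  moosGo kilod.toNat suur v_ike kilod 0 0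

-- ===== PORT B =====
def moos_alt (suur : Int) (v_ike : Int) (kilod : Int) : Int :=
  if kilod ≤ 0 then (if kilod = 0 then 0 else -1)
  else
    let big := if suur > 0 then min suur (PySem.Int.floordiv kilod 5) else 0
    let rem := kilod - 5 * big
    if rem = 0 then big
    else if v_ike ≥ rem then big + rem else -1

-- ===== PRECONDITION & SPEC =====
def Spec_moos (suur : Int) (v_ike : Int) (kilod : Int) (out : Int) : Prop := out = moos_alt suur v_ike kilod
instance (suur : Int) (v_ike : Int) (kilod : Int) (out : Int) : Decidable (Spec_moos suur v_ike kilod out) := by unfold Spec_moos; infer_instance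

-- ===== CLAIM (what is proved, stated in full; the proofs are below) =====
def Claim_equal_moos : Prop := ∀ (suur : Int) (v_ike : Int) (kilod : Int), Dom_moos suur v_ike kilod → Spec_moos suur v_ike kilod (moos suur v_ike kilod)

-- ===== LEMMAS AND PROOFS =====

-- moos_alt with its local bindings inlined (definitional):
theorem moos_alt_eq (s v k : Int) : moos_alt s v k =
    (if k ≤ 0 then (if k = 0 then 0 else -1)
     else if k - 5 * (if s > 0 then min s (PySem.Int.floordiv k 5) else 0) = 0 then
       (if s > 0 then min s (PySem.Int.floordiv k 5) else 0)
     else if v ≥ k - 5 * (if s > 0 then min s (PySem.Int.floordiv k 5) else 0) then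
       (if s > 0 then min s (PySem.Int.floordiv k 5) else 0) + (k - 5 * (if s > 0 then min s (PySem.Int.floordiv k 5) else 0))
     else -1) := rfl

-- moos_alt never returns -1 on success, so -1 marks failure; the loop invariant:
set_option maxHeartbeats 4000000 in
theorem moosGo_eq (fuel : Nat) : ∀ (suur v_ike kilod sk vk : Int), kilod.toNat ≤ fuel →
    moosGo fuel suur v_ike kilod sk vk =
      (if moos_alt suur v_ike kilod = -1 then -1 else sk + vk + moos_alt suur v_ike kilod) := by
  induction fuel with
  | zero =>
    intro s v k sk vk hf
    rw [moosGo, if_neg (by omega : ¬ k > 0)]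
    simp only [moos_alt_eq, PySem.Int.floordiv_eq_ediv_of_pos (b := 5) (by norm_num)]
    split_ifs <;> (try contradiction) <;> omega
  | succ f ih =>
    intro s v k sk vk hf
    by_cases hk : k > 0
    · rw [moosGo, if_pos hk]
      by_cases hbig : k ≥ 5 ∧ s > 0
      · rw [if_pos hbig, ih (s - 1) v (k - 5) (sk + 1) vk (by omega)]
        simp only [moos_alt_eq, PySem.Int.floordiv_eq_ediv_of_pos (b := 5) (by norm_num)]
        split_ifs <;> (try contradiction) <;> omega
      · rw [if_neg hbig]
        by_cases hv : v > 0
        · rw [if_pos hv, ih s (v - 1) (k - 1) sk (vk + 1) (by omega)]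
          simp only [moos_alt_eq, PySem.Int.floordiv_eq_ediv_of_pos (b := 5) (by norm_num)]
          split_ifs <;> (try contradiction) <;> omega
        · rw [if_neg hv]
          simp only [moos_alt_eq, PySem.Int.floordiv_eq_ediv_of_pos (b := 5) (by norm_num)]
          split_ifs <;> (try contradiction) <;> omega
    · rw [moosGo, if_neg hk]
      simp only [moos_alt_eq, PySem.Int.floordiv_eq_ediv_of_pos (b := 5) (by norm_num)]
      split_ifs <;> (try contradiction) <;> omega

-- ===== VERDICT (by name: the statement is the Claim_ definition above) =====
theorem moos_spec : Claim_equal_moos := by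
  intro s v k _
  unfold Spec_moos moos
  rw [moosGo_eq k.toNat s v k 0 0 le_rfl]
  split_ifs with h
  · rw [h]
  · omega
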